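-- pv_equiv track=rewrite | github.com/jcraig949jfi/Prometheus | prometheus_math/lehmer_brute_force.py | total_subspace_size
-- ===== SOURCE A (Python) =====
-- DEFAULT_COEF_RANGE: tuple[int, int] = (-5, 5)
--
-- def total_subspace_size(
--     coef_range: tuple[int, int] = DEFAULT_COEF_RANGE,
--     c0_positive_only: bool = True,
-- ) -> int:
--     """Number of polynomials in the half-coefficient enumeration."""
--     lo, hi = int(coef_range[0]), int(coef_range[1])
--     inner_count = hi - lo + 1
--     if c0_positive_only:
--         c0_count = sum(1 for c in range(lo, hi + 1) if c > 0)
--     else: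
--         c0_count = sum(1 for c in range(lo, hi + 1) if c != 0)
--     return c0_count * (inner_count ** 7)
-- ===== SOURCE B (Python) =====
-- def total_subspace_size(
--     coef_range=(-5, 5),
--     c0_positive_only=True,
-- ):
--     """Number of polynomials in the half-coefficient enumeration (closed form)."""
--     lo, hi = int(coef_range[0]), int(coef_range[1])
--     inner_count = hi - lo + 1
--     if c0_positive_only:
--         c0_count = max(0, hi - max(lo, 1) + 1)
--     else:
--         c0_count = max(0, inner_count) - (1 if lo <= 0 <= hi else 0)
--     return c0_count * inner_count ** 7
-- ===== Notes on version B (the rewrite author's own statement) =====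
-- stated objective: faster
-- what changed: Replaced the O(n) counting loop over range(lo, hi+1) with a closed-form arithmetic expression for c0_count (max(0, hi - max(lo,1) + 1) for the positive case, max(0, inner_count) minus an indicator for 0 in [lo,hi] for the nonzero case).
import Mathlib
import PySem

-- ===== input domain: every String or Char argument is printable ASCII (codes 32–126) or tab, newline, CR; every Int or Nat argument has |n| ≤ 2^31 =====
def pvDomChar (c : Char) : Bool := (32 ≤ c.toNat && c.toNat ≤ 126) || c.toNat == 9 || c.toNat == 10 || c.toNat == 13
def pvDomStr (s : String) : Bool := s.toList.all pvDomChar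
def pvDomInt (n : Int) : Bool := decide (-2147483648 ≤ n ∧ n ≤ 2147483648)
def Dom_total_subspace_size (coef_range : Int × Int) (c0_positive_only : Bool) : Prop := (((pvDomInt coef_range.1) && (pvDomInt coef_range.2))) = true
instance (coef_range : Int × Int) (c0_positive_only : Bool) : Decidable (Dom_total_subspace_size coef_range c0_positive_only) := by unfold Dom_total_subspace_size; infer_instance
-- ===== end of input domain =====

-- B replaces A's counting loop over range(lo, hi+1) by a closed-form expression for c0_count (faster).
-- ===== PORT A =====
-- sum(1 for c in range(lo, hi+1) if p(c)): a single pass over the range with a running sum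
def pvGenSum (p : Int → Bool) (lo hi acc : Int) : Int :=
  if lo < hi then pvGenSum p (lo + 1) hi (acc + if p lo then 1 else 0) else acc
termination_by (hi - lo).toNat
decreasing_by omega

def total_subspace_size (coef_range : Int × Int) (c0_positive_only : Bool) : Int :=
  let lo := coef_range.1
  let hi := coef_range.2
  let inner_count := hi - lo + 1
  let c0_count :=
    if c0_positive_only then
      pvGenSum (fun c => 0 < c) lo (hi + 1) 0
    else
      pvGenSum (fun c => c ≠ 0) lo (hi + 1) 0
  c0_count * inner_count ^ 7

-- ===== PORT B =====
def total_subspace_size_alt (coef_range : Int × Int) (c0_positive_only : Bool) : Int :=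
  let lo := coef_range.1
  let hi := coef_range.2
  let inner_count := hi - lo + 1
  let c0_count :=
    if c0_positive_only then
      max 0 (hi - max lo 1 + 1)
    else
      max 0 inner_count - (if lo ≤ 0 ∧ 0 ≤ hi then 1 else 0)
  c0_count * inner_count ^ 7

-- ===== PRECONDITION & SPEC =====
def Spec_total_subspace_size (coef_range : Int × Int) (c0_positive_only : Bool) (out : Int) : Prop := out = total_subspace_size_alt coef_range c0_positive_only
instance (coef_range : Int × Int) (c0_positive_only : Bool) (out : Int) : Decidable (Spec_total_subspace_size coef_range c0_positive_only out) := by unfold Spec_total_subspace_size; infer_instance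

-- ===== CLAIM (what is proved, stated in full; the proofs are below) =====
def Claim_equal_total_subspace_size : Prop := ∀ (coef_range : Int × Int) (c0_positive_only : Bool), Dom_total_subspace_size coef_range c0_positive_only → Spec_total_subspace_size coef_range c0_positive_only (total_subspace_size coef_range c0_positive_only)

-- ===== LEMMAS AND PROOFS =====

-- ===== VERDICT (by name: the statement is the Claim_ definition above) =====
-- count of positives in [lo, hi)
theorem pvSumPos (lo hi acc : Int) :
    pvGenSum (fun c => 0 < c) lo hi acc = acc + max 0 (hi - max lo 1) := by
  rw [pvGenSum]
  by_cases h : lo < hi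
  · rw [if_pos h, pvSumPos (lo + 1) hi]
    simp only [max_def, decide_eq_true_eq]; split_ifs <;> omega
  · rw [if_neg h]; simp only [max_def]; split_ifs <;> omega
termination_by (hi - lo).toNat
decreasing_by omega

-- count of nonzeros in [lo, hi)
theorem pvSumNe (lo hi acc : Int) :
    pvGenSum (fun c => c ≠ 0) lo hi acc
      = acc + (max 0 (hi - lo) - (if lo ≤ 0 ∧ 0 < hi then 1 else 0)) := by
  rw [pvGenSum]
  by_cases h : lo < hi
  · rw [if_pos h, pvSumNe (lo + 1) hi]
    simp only [max_def, decide_eq_true_eq]; split_ifs <;> omega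
  · rw [if_neg h]; simp only [max_def]; split_ifs <;> omega
termination_by (hi - lo).toNat
decreasing_by omega

theorem total_subspace_size_spec : Claim_equal_total_subspace_size := by
  intro ⟨lo, hi⟩ b _
  unfold Spec_total_subspace_size total_subspace_size total_subspace_size_alt
  cases b <;> simp only [if_true, if_false, Bool.false_eq_true, pvSumPos, pvSumNe]
  · congr 1
    simp only [max_def]; split_ifs <;> omega
  · congr 1
    simp only [max_def]; split_ifs <;> omega
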